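-- pv_equiv track=rewrite | github.com/dreamseedai/dreamseed_monorepo | adaptive_engine/config.py | _fallback_chain
-- ===== SOURCE A (Python) =====
-- from typing import Optional, Dict, List, Tuple
--
-- def _fallback_chain(namespace: Optional[str]) -> List[Optional[str]]:
--     """Generate a right-trim fallback chain for namespaces like 'a:b:c' -> ['a:b:c','a:b','a',None]."""
--     if not namespace:
--         return [None]
--     parts = namespace.split(":")
--     chain: List[Optional[str]] = []
--     for i in range(len(parts), 0, -1):
--         chain.append(":".join(parts[:i]))
--     chain.append(None)
--     return chain
-- ===== SOURCE B (Python) =====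
-- from typing import Optional, List
--
--
-- def _fallback_chain(namespace: Optional[str]) -> List[Optional[str]]:
--     """Generate a right-trim fallback chain for namespaces like 'a:b:c' -> ['a:b:c','a:b','a',None]."""
--     if not namespace:
--         return [None]
--     chain: List[Optional[str]] = []
--     s = namespace
--     while True:
--         chain.append(s)
--         idx = s.rfind(":")
--         if idx == -1:
--             break
--         s = s[:idx]
--     chain.append(None)
--     return chain
-- ===== Notes on version B (the rewrite author's own statement) =====
-- stated objective: simpler
-- what changed: Instead of splitting the namespace into parts and re-joining every prefix, B keeps one running string and repeatedly trims it at the last colon found by rfind, so no part list or joins are built.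
import Mathlib
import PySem

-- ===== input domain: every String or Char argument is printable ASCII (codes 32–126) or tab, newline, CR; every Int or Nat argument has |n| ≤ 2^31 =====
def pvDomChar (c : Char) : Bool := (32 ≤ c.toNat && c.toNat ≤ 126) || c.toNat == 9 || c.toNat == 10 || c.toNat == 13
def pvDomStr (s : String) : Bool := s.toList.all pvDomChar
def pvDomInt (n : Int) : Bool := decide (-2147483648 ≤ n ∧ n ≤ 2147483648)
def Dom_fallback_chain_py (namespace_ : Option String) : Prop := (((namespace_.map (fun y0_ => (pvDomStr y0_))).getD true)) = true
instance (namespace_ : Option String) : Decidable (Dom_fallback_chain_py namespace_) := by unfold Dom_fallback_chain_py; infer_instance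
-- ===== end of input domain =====

-- B replaces A's split-into-parts-and-rejoin-prefixes loop by repeatedly trimming one running
-- string at its last colon (rfind); objective: simpler (no part list, no joins).


-- ===== PORT A =====
def fallback_chain_py (namespace_ : Option String) : List (Option String) :=
  let ns := namespace_.getD ""          -- `if not namespace:` is true exactly for None and ""
  if ns = "" then [none]
  else
    let parts := (PySem.Str.split? ns ":").getD []   -- sep ≠ "" so split? is always `some`
    let chain := (PySem.List.pyRange (parts.length : Int) 0 (-1)).foldl
      (fun acc i => acc ++ [some (PySem.Str.join ":" (PySem.List.slice parts none (some i)))]) []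
    chain ++ [none]

-- ===== PORT B =====
-- Specification of PySem.Chars.rfind.go for a one-character needle; the port's termination
-- proof cites it by name (it is also used by the equivalence proof below).
theorem rfind_go_spec (cs : List Char) (c : Char) (j : Nat) :
    (PySem.Chars.rfind.go cs [c] j = -1 ∧ ∀ k ≤ j, ¬ [c] <+: cs.drop k) ∨
    (∃ n : Nat, PySem.Chars.rfind.go cs [c] j = (n : Int) ∧ n ≤ j ∧ [c] <+: cs.drop n ∧
      ∀ k, n < k → k ≤ j → ¬ [c] <+: cs.drop k) := by
  induction j with
  | zero =>
    by_cases hp : ([c].isPrefixOf cs : Bool)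
    · right
      refine ⟨0, by simp [PySem.Chars.rfind.go, hp], le_refl 0, ?_, by omega⟩
      simpa [List.isPrefixOf_iff_prefix] using hp
    · left
      constructor
      · simp [PySem.Chars.rfind.go, hp]
      · intro k hk
        interval_cases k
        simpa [List.isPrefixOf_iff_prefix] using hp
  | succ j ih =>
    by_cases hp : ([c].isPrefixOf (cs.drop (j + 1)) : Bool)
    · right
      refine ⟨j + 1, by simp [PySem.Chars.rfind.go, hp], le_refl _, ?_, by omega⟩
      simpa [List.isPrefixOf_iff_prefix] using hp
    · have hgo : PySem.Chars.rfind.go cs [c] (j + 1) = PySem.Chars.rfind.go cs [c] j := by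
        simp [PySem.Chars.rfind.go, hp]
      rcases ih with ⟨h1, h2⟩ | ⟨n, hn, hnj, hpre, hmax⟩
      · left
        refine ⟨hgo ▸ h1, ?_⟩
        intro k hk
        rcases Nat.lt_or_ge k (j + 1) with h | h
        · exact h2 k (by omega)
        · have : k = j + 1 := by omega
          subst this
          simpa [List.isPrefixOf_iff_prefix] using hp
      · right
        refine ⟨n, hgo ▸ hn, by omega, hpre, ?_⟩
        intro k hk1 hk2
        rcases Nat.lt_or_ge k (j + 1) with h | h
        · exact hmax k hk1 (by omega)
        · have : k = j + 1 := by omega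
          subst this
          simpa [List.isPrefixOf_iff_prefix] using hp

-- rfind spec at j = length: either -1, or a valid index n (cited by fcAux's decreasing_by).
theorem rfind_spec (cs : List Char) (c : Char) :
    (PySem.Chars.rfind cs [c] = -1 ∧ c ∉ cs) ∨
    (∃ n : Nat, PySem.Chars.rfind cs [c] = (n : Int) ∧ n < cs.length ∧
      cs.drop n = c :: cs.drop (n + 1) ∧ c ∉ cs.drop (n + 1)) := by
  have key : ∀ (l : List Char) (d : Nat), (∀ k, d ≤ k → ¬ [c] <+: cs.drop k) →
      l = cs.drop d → c ∉ l := by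
    intro l d hk hl hmem
    subst hl
    obtain ⟨i, hi, hget⟩ := List.mem_iff_getElem.mp hmem
    have : [c] <+: cs.drop (d + i) := by
      have hdd : cs.drop (d + i) = c :: cs.drop (d + i + 1) := by
        have hcd := List.getElem_cons_drop hi
        rw [hget, List.drop_drop, List.drop_drop] at hcd
        rw [show d + i + 1 = d + (i + 1) by omega]
        exact hcd.symm
      exact ⟨_, by rw [hdd]; rfl⟩
    exact hk (d + i) (by omega) this
  rcases rfind_go_spec cs c cs.length with ⟨h1, h2⟩ | ⟨n, hn, _, hpre, hmax⟩
  · left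
    refine ⟨h1, key cs 0 ?_ (by simp)⟩
    intro k _
    by_cases h : k ≤ cs.length
    · exact h2 k h
    · rw [List.drop_eq_nil_of_le (by omega)]
      simp
  · right
    have hlt : n < cs.length := by
      by_contra h
      rw [List.drop_eq_nil_of_le (by omega)] at hpre
      simp at hpre
    obtain ⟨t, ht⟩ := hpre
    have hdrop : cs.drop n = c :: cs.drop (n + 1) := by
      have h1 : cs.drop n = cs[n] :: cs.drop (n + 1) := (List.getElem_cons_drop hlt).symm
      have h2 : cs[n] = c := by
        have hh := congrArg List.head? ht
        rw [h1] at hh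
        simp only [List.cons_append, List.nil_append, List.head?_cons] at hh
        exact (Option.some_inj.mp hh).symm
      rw [h1, h2]
    refine ⟨n, hn, hlt, hdrop, key _ (n + 1) ?_ rfl⟩
    intro k hk
    by_cases h : k ≤ cs.length
    · exact hmax k (by omega) h
    · rw [List.drop_eq_nil_of_le (by omega)]
      simp

-- The `while True` loop of B, as structural recursion on the code points of the running
-- string (PySem.Str.rfind / Str.slice are exactly Chars.rfind / List.slice on .toList).
def fcAux (cs : List Char) : List (Option String) :=
  let idx := PySem.Chars.rfind cs [':']
  if h : idx = -1 then [some (String.ofList cs)]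
  else some (String.ofList cs) :: fcAux (PySem.List.slice cs none (some idx))
termination_by cs.length
decreasing_by
  rcases rfind_spec cs ':' with ⟨h1, _⟩ | ⟨n, hn, hlt, _, _⟩
  · exact absurd h1 h
  · rw [hn, show PySem.List.slice cs none (some (n : Int)) = cs.take (n : Int).toNat from
      PySem.List.slice_to cs (by omega)]
    simp only [List.length_take, Int.toNat_natCast]
    omega

def fallback_chain_py_alt (namespace_ : Option String) : List (Option String) :=
  let ns := namespace_.getD ""
  if ns = "" then [none]
  else fcAux ns.toList ++ [none]

-- ===== PRECONDITION & SPEC =====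
def Spec_fallback_chain_py (namespace_ : Option String) (out : List (Option String)) : Prop := out = fallback_chain_py_alt namespace_
instance (namespace_ : Option String) (out : List (Option String)) : Decidable (Spec_fallback_chain_py namespace_ out) := by unfold Spec_fallback_chain_py; infer_instance

-- ===== CLAIM (what is proved, stated in full; the proofs are below) =====
def Claim_equal_fallback_chain_py : Prop := ∀ (namespace_ : Option String), Dom_fallback_chain_py namespace_ → Spec_fallback_chain_py namespace_ (fallback_chain_py namespace_)

-- ===== LEMMAS AND PROOFS =====
theorem modifyHead_id' {α : Type} (l : List (List α)) :
    l.modifyHead (fun x => x) = l := by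
  cases l <;> simp

theorem splitOn_go_spec (c : Char) : ∀ (fuel : Nat) (l cur : List Char) (acc : List (List Char)),
    l.length < fuel →
    PySem.Chars.splitOn.go [c] fuel l cur acc =
      acc.reverse ++ (l.splitOn c).modifyHead (fun x => cur.reverse ++ x) := by
  intro fuel
  induction fuel with
  | zero => intro l cur acc h; omega
  | succ fuel ih =>
    intro l cur acc h
    cases l with
    | nil =>
      simp [PySem.Chars.splitOn.go, List.splitOn_nil]
    | cons x rest =>
      by_cases hx : x = c
      · subst hx
        have hpre : ([x].isPrefixOf (x :: rest) : Bool) = true := by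
          simp [List.isPrefixOf]
        rw [show PySem.Chars.splitOn.go [x] (fuel + 1) (x :: rest) cur acc
              = PySem.Chars.splitOn.go [x] fuel (List.drop 1 (x :: rest)) [] (cur.reverse :: acc) by
            simp [PySem.Chars.splitOn.go, hpre]]
        rw [ih _ _ _ (by simp at h ⊢; omega)]
        simp [List.splitOn, List.splitOnP_cons, modifyHead_id']
      · have hpre : ([c].isPrefixOf (x :: rest) : Bool) = false := by
          simp [List.isPrefixOf]
          intro h'; exact absurd h'.symm hx
        rw [show PySem.Chars.splitOn.go [c] (fuel + 1) (x :: rest) cur acc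
              = PySem.Chars.splitOn.go [c] fuel rest (x :: cur) acc by
            simp [PySem.Chars.splitOn.go, hpre]]
        rw [ih _ _ _ (by simp only [List.length_cons] at h; omega)]
        have hxc : (x == c) = false := by simpa using hx
        simp only [List.splitOn, List.splitOnP_cons, hxc, Bool.false_eq_true, if_false]
        congr 1
        cases List.splitOnP (fun y => y == c) rest <;> simp

theorem chars_splitOn_eq (cs : List Char) (c : Char) :
    PySem.Chars.splitOn cs [c] = cs.splitOn c := by
  unfold PySem.Chars.splitOn
  rw [splitOn_go_spec c (cs.length + 1) cs [] [] (by omega)]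
  simp [modifyHead_id']

theorem core_lemma : ∀ (N : Nat) (cs : List Char), cs.length ≤ N →
    (List.range (cs.splitOn ':').length).map
      (fun k => some (String.ofList ([':'].intercalate
        ((cs.splitOn ':').take ((cs.splitOn ':').length - k)))))
    = fcAux cs := by
  intro N
  induction N with
  | zero =>
    intro cs h
    have : cs = [] := List.eq_nil_of_length_eq_zero (by omega)
    subst this
    rw [fcAux]
    simp [PySem.Chars.rfind, PySem.Chars.rfind.go, List.isPrefixOf, List.splitOn_nil,
      List.intercalate]
  | succ N ih =>
    intro cs hlen
    rcases rfind_spec cs ':' with ⟨h1, hnotin⟩ | ⟨n, hn, hlt, hdrop, hnr⟩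
    · -- no ':' in cs: one part, one chain element
      have hsplit : cs.splitOn ':' = [cs] :=
        List.splitOnP_eq_single _ _ (by intro x hx; simp; rintro rfl; exact hnotin hx)
      rw [fcAux]
      simp [h1, hsplit, List.intercalate]
    · -- last ':' at index n: cs = t ++ ':' :: r with ':' ∉ r
      have hcs : cs = cs.take n ++ ':' :: cs.drop (n + 1) := by
        conv_lhs => rw [← List.take_append_drop n cs]
        rw [hdrop]
      have hr : ∀ x ∈ cs.drop (n + 1), ¬((x == ':') = true) := by
        intro x hx; simp; rintro rfl; exact hnr hx
      have hsplit : cs.splitOn ':' = (cs.take n).splitOn ':' ++ [cs.drop (n + 1)] := by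
        conv_lhs => rw [hcs]
        simp only [List.splitOn]
        rw [List.splitOnP_append_cons _ _ _ _ (by simp), List.splitOnP_eq_single _ _ hr]
      have hne := List.splitOnP_ne_nil (fun x => x == ':') (cs.take n)
      have hm : 1 ≤ ((cs.take n).splitOn ':').length := by
        rcases List.exists_cons_of_ne_nil hne with ⟨a, l, hl⟩
        simp [List.splitOn, hl]
      set P := (cs.take n).splitOn ':' with hP
      -- unfold fcAux once
      rw [fcAux]
      rw [dif_neg (by rw [hn]; omega)]
      rw [show PySem.List.slice cs none (some (PySem.Chars.rfind cs [':']))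
            = cs.take n by rw [hn]; rw [PySem.List.slice_to cs (by omega)]; simp]
      rw [← ih (cs.take n) (by simp; omega)]
      rw [hsplit]
      have hlenPQ : (P ++ [cs.drop (n + 1)]).length = P.length + 1 := by simp
      rw [hlenPQ, List.range_succ_eq_map, List.map_cons, List.map_map]
      congr 1
      · -- head: the full join is cs itself
        have : (P ++ [cs.drop (n + 1)]).take (P.length + 1 - 0) = P ++ [cs.drop (n + 1)] := by
          rw [show P.length + 1 - 0 = (P ++ [cs.drop (n + 1)]).length by simp]
          exact List.take_length
        rw [this, ← hsplit, List.intercalate_splitOn]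
      · -- tail: prefixes of P only
        apply List.map_congr_left
        intro j hj
        have hj' : j < P.length := List.mem_range.mp hj
        simp only [Function.comp]
        congr 2
        rw [show P.length + 1 - Nat.succ j = P.length - j by omega, ← hP]
        congr 1
        exact List.take_append_of_le_length (by omega)

theorem foldl_append_singleton {ι α : Type} (l : List ι) (f : ι → α) (acc : List α) :
    l.foldl (fun a i => a ++ [f i]) acc = acc ++ l.map f := by
  induction l generalizing acc <;> simp [*]

theorem pyRange_countdown (n : Nat) :
    PySem.List.pyRange (n : Int) 0 (-1) = (List.range n).map (fun k : Nat => (n : Int) - (k : Int)) := by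
  rcases Nat.eq_zero_or_pos n with h | h
  · subst h; simp [PySem.List.pyRange]
  · have h0 : (0 : Int) < (n : Int) := by exact_mod_cast h
    simp only [PySem.List.pyRange]
    rw [if_neg (by norm_num), if_neg (by norm_num), if_pos h0]
    have hc : (((n : Int) - 0 + -(-1) - 1) / -(-1)).toNat = n := by
      norm_num
    rw [hc]
    apply List.map_congr_left
    intro k _
    ring

theorem join_map_ofList (X : List (List Char)) :
    PySem.Str.join ":" (X.map String.ofList) = String.ofList ([':'].intercalate X) := by
  have hmap : List.map String.toList (List.map String.ofList X) = X := by
    rw [List.map_map]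
    simp [Function.comp_def]
  simp only [PySem.Str.join, PySem.Chars.join, hmap, show (":" : String).toList = [':'] from rfl]

-- ===== VERDICT (by name: the statement is the Claim_ definition above) =====
theorem fallback_chain_py_spec : Claim_equal_fallback_chain_py := by
  intro namespace_ _
  unfold Spec_fallback_chain_py fallback_chain_py fallback_chain_py_alt
  by_cases hns : namespace_.getD "" = ""
  · simp [hns]
  · simp only [hns, if_false]
    congr 1
    set s := namespace_.getD "" with hs
    have hparts : (PySem.Str.split? s ":").getD []
        = (s.toList.splitOn ':').map String.ofList := by
      simp [PySem.Str.split?, PySem.Chars.split?,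
        show (":" : String).toList = [':'] from rfl, chars_splitOn_eq]
    rw [hparts]
    set P := s.toList.splitOn ':' with hP
    rw [List.length_map, pyRange_countdown, foldl_append_singleton, List.nil_append,
      List.map_map]
    rw [← core_lemma s.toList.length s.toList (le_refl _), ← hP]
    apply List.map_congr_left
    intro k hk
    have hk' : k < P.length := List.mem_range.mp hk
    simp only [Function.comp]
    congr 1
    rw [show PySem.List.slice (P.map String.ofList) none (some ((P.length : Int) - k))
          = (P.map String.ofList).take (((P.length : Int) - k)).toNat from
        PySem.List.slice_to _ (by omega)]
    rw [show (((P.length : Int) - k)).toNat = P.length - k by omega]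
    rw [← List.map_take, join_map_ofList]
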